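-- pv_equiv track=rewrite | github.com/sgarner-lt/advent-of-code-2025 | solutions/bosque/day06/runner.py | find_column_boundaries
-- ===== SOURCE A (Python) =====
-- def find_column_boundaries(rows):
--     """
--     Find column boundaries where all rows have whitespace.
--     Returns the start positions of each column.
--
--     This is critical for Part 2 because numbers are right-aligned
--     in fixed-width columns. For example, "593" might be " 593" and
--     "4" might be "   4" in a 4-character column.
--     """
--     if not rows:
--         return []
--
--     max_len = max(len(row) for row in rows)
--     boundaries = [0]  # First column always starts at 0
--
--     in_whitespace = False
--
--     for pos in range(max_len):
--         # Check if all rows have whitespace or are beyond their length at this position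
--         all_whitespace = all(
--             pos >= len(row) or row[pos].isspace()
--             for row in rows
--         )
--
--         if all_whitespace and not in_whitespace:
--             in_whitespace = True
--         elif not all_whitespace and in_whitespace:
--             boundaries.append(pos)
--             in_whitespace = False
--
--     return boundaries
-- ===== SOURCE B (Python) =====
-- def find_column_boundaries(rows):
--     if not rows:
--         return []
--     # Row-major pass: collect every column index holding a non-space character.
--     content = set()
--     for row in rows:
--         for i, ch in enumerate(row):
--             if not ch.isspace():
--                 content.add(i)
--     # A column boundary is 0, plus the start of every content run after a blank column.
--     return [0] + [p for p in sorted(content) if p >= 1 and p - 1 not in content]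
-- ===== Notes on version B (the rewrite author's own statement) =====
-- stated objective: alternative
-- what changed: Replaced A's column-major scan (for each column, test all rows for whitespace, tracking an in_whitespace flag) by a row-major single pass that collects the set of content column indices per character, then reads boundaries off the sorted set as run starts (p in set, p-1 not in set).
import Mathlib
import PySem

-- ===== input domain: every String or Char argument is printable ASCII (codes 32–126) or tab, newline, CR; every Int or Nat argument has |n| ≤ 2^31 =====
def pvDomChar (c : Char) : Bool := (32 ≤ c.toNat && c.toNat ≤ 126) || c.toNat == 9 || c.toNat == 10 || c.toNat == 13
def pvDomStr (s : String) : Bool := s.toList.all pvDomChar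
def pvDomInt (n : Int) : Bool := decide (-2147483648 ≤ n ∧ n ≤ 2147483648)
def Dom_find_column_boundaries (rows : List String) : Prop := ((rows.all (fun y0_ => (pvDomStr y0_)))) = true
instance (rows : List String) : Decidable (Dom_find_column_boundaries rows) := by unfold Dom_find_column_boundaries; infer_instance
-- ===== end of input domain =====

-- B replaces A's column-major flag scan by a row-major pass collecting the set of content columns, then reads run starts off the sorted set (alternative algorithm, same results).

-- ===== PORT A =====
-- 'all(pos >= len(row) or row[pos].isspace() for row in rows)'
def pvAllWs (rows : List String) (pos : Int) : Bool :=
  rows.all (fun row =>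
    decide (pos ≥ PySem.Str.len row) ||
      (match PySem.Str.pyGet? row pos with
       | some c => PySem.Chars.isspace c
       | none => false))

def pvStepA (rows : List String) (st : List Int × Bool) (pos : Int) : List Int × Bool :=
  let allWs := pvAllWs rows pos
  if allWs && !st.2 then (st.1, true)
  else if !allWs && st.2 then (st.1 ++ [pos], false)
  else st

def find_column_boundaries (rows : List String) : List Int :=
  if rows = [] then []
  else
    match PySem.List.max? (rows.map (fun r => PySem.Str.len r)) (fun x => x) with
    | none => []
    | some maxLen =>
      ((PySem.List.pyRange 0 maxLen 1).foldl (pvStepA rows) ([0], false)).1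

-- ===== PORT B =====
-- inner loop: 'for i, ch in enumerate(row): if not ch.isspace(): content.add(i)'
def pvContentRow (s : PySem.Set Int) (row : String) : PySem.Set Int :=
  (PySem.List.enumerate row.toList 0).foldl
    (fun s q => if !PySem.Chars.isspace q.2 then PySem.Set.add s q.1 else s) s

def find_column_boundaries_alt (rows : List String) : List Int :=
  if rows = [] then []
  else
    let content := rows.foldl pvContentRow PySem.Set.empty
    0 :: (PySem.List.sorted content (fun x => x) false).filter
      (fun p => decide (1 ≤ p) && ! PySem.Set.contains content (p - 1))

-- ===== PRECONDITION & SPEC =====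
def Spec_find_column_boundaries (rows : List String) (out : List Int) : Prop := out = find_column_boundaries_alt rows
instance (rows : List String) (out : List Int) : Decidable (Spec_find_column_boundaries rows out) := by unfold Spec_find_column_boundaries; infer_instance

-- ===== CLAIM (what is proved, stated in full; the proofs are below) =====
def Claim_equal_find_column_boundaries : Prop := ∀ (rows : List String), Dom_find_column_boundaries rows → Spec_find_column_boundaries rows (find_column_boundaries rows)

-- ===== LEMMAS AND PROOFS =====

-- invariant of A's loop: boundaries = [0] ++ transitions so far, flag = ws-status of the last column
theorem pvLoopA (rows : List String) (n : Nat) :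
    (PySem.List.pyRange 0 (n : Int) 1).foldl (pvStepA rows) ([0], false)
    = (0 :: (PySem.List.pyRange 1 (n : Int) 1).filter
          (fun pos => pvAllWs rows (pos - 1) && ! pvAllWs rows pos),
       if n = 0 then false else pvAllWs rows ((n : Int) - 1)) := by
  induction n with
  | zero => simp [PySem.List.pyRange_one_eq_nil]
  | succ k ih =>
    have h1 : ((k + 1 : Nat) : Int) = (k : Int) + 1 := by push_cast; ring
    rw [h1, PySem.List.pyRange_one_succ_right (by omega : (0 : Int) ≤ (k : Int)),
        List.foldl_append, ih]
    by_cases hk : k = 0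
    · subst hk
      norm_num [PySem.List.pyRange_one_eq_nil, PySem.List.pyRange_one_singleton, pvStepA]
      cases pvAllWs rows 0 <;> simp
    · rw [PySem.List.pyRange_one_succ_right (by omega : (1 : Int) ≤ (k : Int)), List.filter_append]
      simp only [List.foldl_cons, List.foldl_nil, List.filter_cons, List.filter_nil, hk, if_false]
      unfold pvStepA
      cases hprev : pvAllWs rows ((k : Int) - 1) <;> cases hcur : pvAllWs rows (k : Int) <;>
        simp [hk, hcur]

-- membership through the inner per-row loop
theorem pvMemInner (cs : List Char) (s0 : Int) (s : PySem.Set Int) (p : Int) :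
    (p ∈ (PySem.List.enumerate cs s0).foldl
        (fun s q => if !PySem.Chars.isspace q.2 then PySem.Set.add s q.1 else s) s)
    ↔ p ∈ s ∨ ∃ k : Nat, ∃ _ : k < cs.length, p = s0 + k ∧ PySem.Chars.isspace cs[k] = false := by
  induction cs generalizing s0 s with
  | nil => simp [PySem.List.enumerate_nil]
  | cons c cs ih =>
    rw [PySem.List.enumerate_cons]
    simp only [List.foldl_cons]
    rw [ih]
    cases hcs : PySem.Chars.isspace c with
    | false =>
      simp only [Bool.not_false, if_true, PySem.Set.mem_add]
      constructor
      · rintro ((h | h) | ⟨k, hk, hp, hws⟩)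
        · exact Or.inl h
        · exact Or.inr ⟨0, by simp, by omega, by simpa using hcs⟩
        · exact Or.inr ⟨k + 1, by simpa using hk, by push_cast at hp ⊢; omega, by simpa using hws⟩
      · rintro (h | ⟨k, hk, hp, hws⟩)
        · exact Or.inl (Or.inl h)
        · match k, hk, hp, hws with
          | 0, _, hp, _ => exact Or.inl (Or.inr (by omega))
          | k + 1, hk, hp, hws =>
            exact Or.inr ⟨k, by simp only [List.length_cons] at hk; omega, by push_cast at hp ⊢; omega, by simpa using hws⟩
    | true =>
      simp only [Bool.not_true, Bool.false_eq_true, if_false]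
      constructor
      · rintro (h | ⟨k, hk, hp, hws⟩)
        · exact Or.inl h
        · exact Or.inr ⟨k + 1, by simpa using hk, by push_cast at hp ⊢; omega, by simpa using hws⟩
      · rintro (h | ⟨k, hk, hp, hws⟩)
        · exact Or.inl h
        · match k, hk, hp, hws with
          | 0, _, hp, hws => simp only [List.getElem_cons_zero] at hws; rw [hws] at hcs; cases hcs
          | k + 1, hk, hp, hws =>
            exact Or.inr ⟨k, by simp only [List.length_cons] at hk; omega, by push_cast at hp ⊢; omega, by simpa using hws⟩

-- membership of the full content set
theorem pvMemContent (rows : List String) (s : PySem.Set Int) (p : Int) :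
    (p ∈ rows.foldl pvContentRow s)
    ↔ p ∈ s ∨ ∃ row ∈ rows, ∃ k : Nat, ∃ _ : k < row.toList.length,
        p = (k : Int) ∧ PySem.Chars.isspace row.toList[k] = false := by
  induction rows generalizing s with
  | nil => simp
  | cons r rows ih =>
    simp only [List.foldl_cons]
    rw [ih]
    unfold pvContentRow
    rw [pvMemInner]
    constructor
    · rintro ((h | ⟨k, hk, hp, hws⟩) | ⟨row, hrow, k, hk, hp, hws⟩)
      · exact Or.inl h
      · exact Or.inr ⟨r, by simp, k, hk, by omega, hws⟩
      · exact Or.inr ⟨row, by simp [hrow], k, hk, hp, hws⟩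
    · rintro (h | ⟨row, hrow, k, hk, hp, hws⟩)
      · exact Or.inl (Or.inl h)
      · rcases List.mem_cons.mp hrow with rfl | hrow
        · exact Or.inl (Or.inr ⟨k, hk, by omega, hws⟩)
        · exact Or.inr ⟨row, hrow, k, hk, hp, hws⟩

-- the content set stays duplicate-free
theorem pvNodupInner (l : List (Int × Char)) (s : PySem.Set Int) (h : s.Nodup) :
    (l.foldl (fun s q => if !PySem.Chars.isspace q.2 then PySem.Set.add s q.1 else s) s).Nodup := by
  induction l generalizing s with
  | nil => simpa
  | cons q l ih =>
    simp only [List.foldl_cons]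
    apply ih
    cases hc : PySem.Chars.isspace q.2
    · simpa [hc] using PySem.Set.nodup_add s q.1 h
    · simpa [hc] using h

theorem pvNodupContent (rows : List String) (s : PySem.Set Int) (h : s.Nodup) :
    (rows.foldl pvContentRow s).Nodup := by
  induction rows generalizing s with
  | nil => simpa
  | cons r rows ih => exact ih _ (pvNodupInner _ _ h)

-- what '¬ all_whitespace at p' means, character-wise (0 ≤ p)
theorem pvAllWs_false_iff (rows : List String) (p : Int) (hp : 0 ≤ p) :
    pvAllWs rows p = false
    ↔ ∃ row ∈ rows, ∃ k : Nat, ∃ _ : k < row.toList.length,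
        p = (k : Int) ∧ PySem.Chars.isspace row.toList[k] = false := by
  unfold pvAllWs
  rw [List.all_eq_false]
  constructor
  · rintro ⟨row, hrow, hf⟩
    simp only [Bool.or_eq_true, decide_eq_true_eq, not_or, Bool.not_eq_true] at hf
    obtain ⟨hlt, hm⟩ := hf
    have hlen : p < (row.toList.length : Int) := by
      rw [PySem.Str.len_eq] at hlt; omega
    have hk : p.toNat < row.toList.length := by omega
    have hget : PySem.Str.pyGet? row p = some row.toList[p.toNat] := by
      have := PySem.Str.pyGet?_natCast row p.toNat
      rw [show ((p.toNat : Int)) = p by omega] at this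
      rw [this]
      exact List.getElem?_eq_getElem hk
    rw [hget] at hm
    exact ⟨row, hrow, p.toNat, hk, by omega, hm⟩
  · rintro ⟨row, hrow, k, hk, rfl, hws⟩
    refine ⟨row, hrow, ?_⟩
    have hget : PySem.Str.pyGet? row (k : Int) = some row.toList[k] := by
      rw [PySem.Str.pyGet?_natCast]
      exact List.getElem?_eq_getElem hk
    have hlen : (decide ((k : Int) ≥ PySem.Str.len row)) = false := by
      rw [decide_eq_false_iff_not, PySem.Str.len_eq]
      omega
    rw [hget, hlen]
    simp [hws]

theorem find_column_boundaries_spec : Claim_equal_find_column_boundaries := by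
  intro rows _
  unfold Spec_find_column_boundaries find_column_boundaries find_column_boundaries_alt
  by_cases h : rows = []
  · simp [h]
  · rcases hm : PySem.List.max? (rows.map (fun r => PySem.Str.len r)) (fun x => x) with _ | maxLen
    · rw [PySem.List.max?_eq_none_iff] at hm
      simp [h] at hm
    · have hmax := PySem.List.max?_isMax hm
      have hmem := PySem.List.max?_mem hm
      have h0 : 0 ≤ maxLen := by
        rcases List.mem_map.mp hmem with ⟨r, _, hr⟩
        subst hr; simp [PySem.Str.len_eq]
      obtain ⟨nn, hnn⟩ : ∃ nn : Nat, maxLen = (nn : Int) := ⟨maxLen.toNat, (Int.toNat_of_nonneg h0).symm⟩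
      subst hnn
      simp only [if_neg h]
      rw [pvLoopA]
      set content := rows.foldl pvContentRow PySem.Set.empty with hcdef
      -- members of content are exactly the non-whitespace columns, all inside [0, maxLen)
      have hmemc : ∀ p : Int, p ∈ content ↔ 0 ≤ p ∧ p < (nn : Int) ∧ pvAllWs rows p = false := by
        intro p
        rw [hcdef, pvMemContent]
        constructor
        · rintro (h | ⟨row, hrow, k, hk, rfl, hws⟩)
          · simp [PySem.Set.empty] at h
          · have hle : PySem.Str.len row ≤ (nn : Int) := hmax _ (List.mem_map.mpr ⟨row, hrow, rfl⟩)
            have hlen : (row.toList.length : Int) ≤ (nn : Int) := by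
              rw [PySem.Str.len_eq] at hle; exact hle
            refine ⟨by omega, by omega, ?_⟩
            rw [pvAllWs_false_iff rows _ (by omega)]
            exact ⟨row, hrow, k, hk, rfl, hws⟩
        · rintro ⟨hp0, hpn, hws⟩
          rw [pvAllWs_false_iff rows _ hp0] at hws
          exact Or.inr hws
      have hnodup : content.Nodup := pvNodupContent rows _ (by simp [PySem.Set.empty])
      -- contains on content, as the whitespace test
      have hcontains : ∀ q : Int, 0 ≤ q → q < (nn : Int) →
          PySem.Set.contains content q = ! pvAllWs rows q := by
        intro q h1 h2
        cases hws : pvAllWs rows q with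
        | false =>
          have hq : q ∈ content := (hmemc q).mpr ⟨h1, h2, hws⟩
          simpa using (PySem.Set.contains_iff content q).mpr hq
        | true =>
          have hq : q ∉ content := fun hc => by simpa [hws] using ((hmemc q).mp hc).2.2
          simp only [Bool.not_true, Bool.eq_false_iff]
          intro hc
          exact hq ((PySem.Set.contains_iff content q).mp hc)
      -- the sorted content set is the range filtered to content columns
      set T := (PySem.List.pyRange 0 (nn : Int) 1).filter
          (fun p => PySem.Set.contains content p) with hTdef
      have hTmem : ∀ p : Int, p ∈ T ↔ p ∈ content := by
        intro p
        rw [hTdef, List.mem_filter, PySem.List.mem_pyRange_one]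
        constructor
        · rintro ⟨_, hc⟩; exact (PySem.Set.contains_iff _ _).mp hc
        · intro hc
          have := (hmemc p).mp hc
          exact ⟨⟨this.1, this.2.1⟩, (PySem.Set.contains_iff _ _).mpr hc⟩
      have hsorted : PySem.List.sorted content (fun x => x) false = T := by
        apply PySem.List.sorted_eq_of_perm_of_pairwise_lt
        · rw [List.perm_ext_iff_of_nodup
            (List.Nodup.filter _ (PySem.List.nodup_pyRange_one 0 (nn : Int))) hnodup]
          exact hTmem
        · exact List.Pairwise.filter _ (PySem.List.pairwise_lt_pyRange_one 0 (nn : Int))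
      rw [hsorted, hTdef, List.filter_filter]
      refine congrArg (0 :: ·) ?_
      have hcond : ∀ p ∈ PySem.List.pyRange 1 (nn : Int) 1,
          (decide (1 ≤ p) && ! PySem.Set.contains content (p - 1) && PySem.Set.contains content p)
          = (pvAllWs rows (p - 1) && ! pvAllWs rows p) := by
        intro p hp
        have hb := PySem.List.mem_pyRange_one.mp hp
        rw [hcontains p (by omega) hb.2, hcontains (p - 1) (by omega) (by omega),
            show decide (1 ≤ p) = true by simp [hb.1]]
        cases pvAllWs rows p <;> cases pvAllWs rows (p - 1) <;> simp
      by_cases hn : (nn : Int) ≤ 0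
      · rw [PySem.List.pyRange_one_eq_nil hn, PySem.List.pyRange_one_eq_nil (by omega)]
        rfl
      · rw [PySem.List.pyRange_one_cons (by omega : (0 : Int) < (nn : Int)),
            List.filter_cons, if_neg (by simp), show (0 : Int) + 1 = 1 from rfl]
        exact (List.filter_congr hcond).symm
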